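-- pv_equiv track=rewrite | github.com/burnedram/aoc2018 | 25/task.py | find_constellations
-- ===== SOURCE A (Python) =====
-- from operator import sub
-- from itertools import starmap
--
-- def mdist(left, right):
--     return sum(map(abs, starmap(sub, zip(left, right))))
--
-- def find_constellations(spacetime):
--     spacetime = spacetime.__iter__()
--     constellation = [next(spacetime)]
--     result = [constellation]
--     for pos in spacetime:
--         new_constellation = True
--         for pos_in_constellation in constellation:
--             if mdist(pos_in_constellation, pos) <= 3:
--                 new_constellation = False
--                 break
--         if new_constellation:
--             constellation = list()
--             result.append(constellation)
--         constellation.append(pos)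
--     return result
-- ===== SOURCE B (Python) =====
-- def mdist(left, right):
--     return sum(abs(a - b) for a, b in zip(left, right))
--
-- def _take_constellation(group, rest):
--     # Grow group by peeling off leading points of rest that touch it; return (group, leftover).
--     while rest and any(mdist(q, rest[0]) <= 3 for q in group):
--         group = group + [rest[0]]
--         rest = rest[1:]
--     return group, rest
--
-- def find_constellations(spacetime):
--     result = []
--     rest = list(spacetime)
--     while rest:
--         group, rest = _take_constellation([rest[0]], rest[1:])
--         result.append(group)
--     return result
-- ===== Notes on version B (the rewrite author's own statement) =====
-- stated objective: alternative
-- what changed: Instead of a single pass that mutates the last group of the result (A's primed iterator with an alias and flag/break inner loop), B repeatedly peels one COMPLETE constellation off the front of the remaining points with a helper and appends it finished to the result, which also makes the empty input return [] where A raises.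
-- crash fix: On the empty list A raises StopIteration (next() on an empty iterator); B returns []. — e.g. on find_constellations([]): A raises StopIteration, B returns []
import Mathlib
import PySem

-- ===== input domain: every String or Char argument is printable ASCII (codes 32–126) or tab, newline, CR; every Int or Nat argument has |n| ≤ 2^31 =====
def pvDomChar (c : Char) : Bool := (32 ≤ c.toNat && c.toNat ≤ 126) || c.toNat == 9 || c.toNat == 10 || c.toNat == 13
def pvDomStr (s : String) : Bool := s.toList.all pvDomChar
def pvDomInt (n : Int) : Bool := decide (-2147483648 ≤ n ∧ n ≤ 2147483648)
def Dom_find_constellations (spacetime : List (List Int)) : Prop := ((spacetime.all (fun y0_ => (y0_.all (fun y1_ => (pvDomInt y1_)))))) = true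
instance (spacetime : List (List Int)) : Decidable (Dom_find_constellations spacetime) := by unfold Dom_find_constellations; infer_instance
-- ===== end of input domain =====

-- B replaces A's single pass that mutates the last group in place by a staged decomposition
-- that peels one complete constellation off the front of the remaining points at a time;
-- same cost, different structure (alternative decomposition).


-- ===== PORT A =====
-- mdist: sum(map(abs, starmap(sub, zip(left, right))))
def mdistA (left right : List Int) : Int :=
  (((left.zip right).map (fun p => p.1 - p.2)).map (fun d => |d|)).sum

-- inner 'for pos_in_constellation in constellation: if mdist ≤ 3: new=False; break'
def newConstA (constellation : List (List Int)) (pos : List Int) : Bool :=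
  match constellation with
  | [] => true
  | q :: rest => if mdistA q pos ≤ 3 then false else newConstA rest pos

-- outer loop; A's 'result' holds an alias of 'constellation' as its last element,
-- modelled as the pair (done, constellation) with result = done ++ [constellation]
def loopA (done : List (List (List Int))) (constellation : List (List Int))
    (rest : List (List Int)) : List (List (List Int)) :=
  match rest with
  | [] => done ++ [constellation]
  | pos :: rest' =>
      if newConstA constellation pos then
        loopA (done ++ [constellation]) [pos] rest'
      else
        loopA done (constellation ++ [pos]) rest'

def find_constellations (spacetime : List (List Int)) : List (List (List Int)) :=
  match spacetime with
  | [] => []          -- A raises StopIteration here; excluded by Pre_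
  | p :: rest => loopA [] [p] rest

-- ===== PORT B =====
-- mdist: sum(abs(a - b) for a, b in zip(left, right))
def mdistB (left right : List Int) : Int :=
  (List.zipWith (fun a b => |a - b|) left right).sum

-- _take_constellation: while rest and any(mdist(q, rest[0]) <= 3 for q in group): …
def takeConstellation (group rest : List (List Int)) :
    List (List Int) × List (List Int) :=
  match rest with
  | [] => (group, [])
  | p :: rs =>
      if group.any (fun q => mdistB q p ≤ 3) then
        takeConstellation (group ++ [p]) rs
      else
        (group, p :: rs)

-- the leftover never grows (needed for termination of the outer while loop)
theorem takeConstellation_snd_le (group rest : List (List Int)) :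
    (takeConstellation group rest).2.length ≤ rest.length := by
  induction rest generalizing group with
  | nil => simp [takeConstellation]
  | cons p rs ih =>
      simp only [takeConstellation]
      split
      · exact Nat.le_trans (ih (group ++ [p])) (Nat.le_succ _)
      · exact Nat.le_refl _

-- outer 'while rest: group, rest = _take_constellation([rest[0]], rest[1:]); result.append(group)'
def find_constellations_alt (spacetime : List (List Int)) : List (List (List Int)) :=
  match spacetime with
  | [] => []
  | p :: rs =>
      let t := takeConstellation [p] rs
      t.1 :: find_constellations_alt t.2
termination_by spacetime.length
decreasing_by
  exact Nat.lt_succ_of_le (takeConstellation_snd_le [p] rs)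

-- ===== PRECONDITION & SPEC =====
-- Pre_ excludes only the empty list, on which A raises StopIteration (next() on an empty iterator).
def Pre_find_constellations (spacetime : List (List Int)) : Prop := spacetime ≠ []
instance (spacetime : List (List Int)) : Decidable (Pre_find_constellations spacetime) := by unfold Pre_find_constellations; infer_instance
def pvWitness_find_constellations : List (List Int) := [[0, 0, 0, 0], [9, 0, 0, 0]]

-- On the empty list A raises StopIteration (next() on an empty iterator); B returns [].
def Raises_find_constellations (spacetime : List (List Int)) : Prop := spacetime = []
instance (spacetime : List (List Int)) : Decidable (Raises_find_constellations spacetime) := by unfold Raises_find_constellations; infer_instance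
def pvRaiseWitness_find_constellations : List (List Int) := []
def pvRaiseWitnessOut_find_constellations : List (List (List Int)) := []

def Spec_find_constellations (spacetime : List (List Int)) (out : List (List (List Int))) : Prop := out = find_constellations_alt spacetime
instance (spacetime : List (List Int)) (out : List (List (List Int))) : Decidable (Spec_find_constellations spacetime out) := by unfold Spec_find_constellations; infer_instance

-- ===== CLAIM =====
def Claim_equal_find_constellations : Prop := ∀ (spacetime : List (List Int)), Dom_find_constellations spacetime → Pre_find_constellations spacetime → Spec_find_constellations spacetime (find_constellations spacetime)
def Claim_raises_find_constellations : Prop := (∀ (spacetime : List (List Int)), Dom_find_constellations spacetime → Raises_find_constellations spacetime → ¬ Pre_find_constellations spacetime) ∧ (Dom_find_constellations (pvRaiseWitness_find_constellations) ∧ Raises_find_constellations (pvRaiseWitness_find_constellations) ∧ find_constellations_alt (pvRaiseWitness_find_constellations) = pvRaiseWitnessOut_find_constellations)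

-- ===== LEMMAS AND PROOFS =====

theorem mdistA_eq_mdistB (l r : List Int) : mdistA l r = mdistB l r := by
  induction l generalizing r with
  | nil => cases r <;> simp [mdistA, mdistB]
  | cons a l ih =>
      cases r with
      | nil => simp [mdistA, mdistB]
      | cons b r =>
          have h := ih r
          simp [mdistA, mdistB] at h ⊢
          omega

theorem newConstA_eq_not_any (c : List (List Int)) (pos : List Int) :
    newConstA c pos = !(c.any (fun q => mdistB q pos ≤ 3)) := by
  induction c with
  | nil => simp [newConstA]
  | cons q c ih =>
      simp only [newConstA, List.any_cons, mdistA_eq_mdistB]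
      by_cases h : mdistB q pos ≤ 3 <;> simp [h, ih]

-- A's running pass equals: peel the current constellation to completion, then continue
theorem loopA_eq_peel (rest : List (List Int)) (done : List (List (List Int)))
    (cur : List (List Int)) :
    loopA done cur rest =
      done ++ ((takeConstellation cur rest).1
        :: find_constellations_alt (takeConstellation cur rest).2) := by
  induction rest generalizing done cur with
  | nil => simp [loopA, takeConstellation, find_constellations_alt]
  | cons pos rs ih =>
      simp only [loopA, takeConstellation, newConstA_eq_not_any]
      by_cases h : cur.any (fun q => mdistB q pos ≤ 3)
      · simp only [h, Bool.not_true, if_true]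
        exact ih done (cur ++ [pos])
      · simp only [h, Bool.not_false, if_true]
        rw [ih (done ++ [cur]) [pos]]
        simp [find_constellations_alt]

-- ===== VERDICT =====
theorem find_constellations_spec : Claim_equal_find_constellations := by
  intro spacetime _ hpre
  unfold Spec_find_constellations
  cases spacetime with
  | nil => exact absurd rfl hpre
  | cons p rest =>
      show loopA [] [p] rest = _
      rw [loopA_eq_peel]
      simp [find_constellations_alt]

@[simp]
theorem find_constellations_raises : Claim_raises_find_constellations := by
  unfold Claim_raises_find_constellations
  exact ⟨fun s _ h => by simp [Raises_find_constellations] at h; simp [h, Pre_find_constellations],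
    by decide, by decide, by simp [pvRaiseWitness_find_constellations,
      pvRaiseWitnessOut_find_constellations, find_constellations_alt]⟩
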